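-- pv_equiv track=rewrite | github.com/soorbu/Sudoku-solver | solver/sudoku/views.py | has_duplicates_in_unit
-- ===== SOURCE A (Python) =====
-- def has_duplicates_in_unit(unit):
--     """Check if a unit (row, column, or box) has duplicate non-zero values"""
--     seen = set()
--     for val in unit:
--         if val != 0:
--             if val in seen:
--                 return True
--             seen.add(val)
--     return False
-- ===== SOURCE B (Python) =====
-- def has_duplicates_in_unit(unit):
--     """Check if a unit (row, column, or box) has duplicate non-zero values"""
--     vals = sorted(v for v in unit if v != 0)
--     return any(a == b for a, b in zip(vals, vals[1:]))
-- ===== Notes on version B (the rewrite author's own statement) =====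
-- stated objective: alternative
-- what changed: Replaces the incremental seen-set with early return by a sort of the non-zero values followed by an adjacent-pair equality scan (no set at all).
import Mathlib
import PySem

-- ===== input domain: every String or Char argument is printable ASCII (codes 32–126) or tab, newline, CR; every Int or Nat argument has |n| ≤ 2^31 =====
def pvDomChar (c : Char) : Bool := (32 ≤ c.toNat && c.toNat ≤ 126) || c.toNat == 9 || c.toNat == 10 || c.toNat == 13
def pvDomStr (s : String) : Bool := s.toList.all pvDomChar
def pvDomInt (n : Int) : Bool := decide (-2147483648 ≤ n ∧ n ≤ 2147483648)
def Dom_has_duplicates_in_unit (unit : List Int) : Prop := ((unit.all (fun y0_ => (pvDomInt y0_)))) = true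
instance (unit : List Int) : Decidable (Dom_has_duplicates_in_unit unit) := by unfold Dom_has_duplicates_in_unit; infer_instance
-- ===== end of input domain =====

-- ===== PORT A =====
-- B replaces A's incremental seen-set loop (with early return) by sorting the
-- non-zero values and scanning adjacent pairs for equality; objective: alternative.
def hasDupGoA : List Int → PySem.Set Int → Bool
  | [], _ => false
  | v :: rest, seen =>
    if v != 0 then
      if PySem.Set.contains seen v then true
      else hasDupGoA rest (PySem.Set.add seen v)
    else hasDupGoA rest seen

def has_duplicates_in_unit (unit : List Int) : Bool :=
  hasDupGoA unit PySem.Set.empty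

-- ===== PORT B =====
def has_duplicates_in_unit_alt (unit : List Int) : Bool :=
  let vals := PySem.List.sorted (unit.filter (fun v => v != 0)) (fun x => x) false
  (vals.zip (vals.drop 1)).any (fun p => p.1 == p.2)

-- ===== PRECONDITION & SPEC =====
def Spec_has_duplicates_in_unit (unit : List Int) (out : Bool) : Prop := out = has_duplicates_in_unit_alt unit
instance (unit : List Int) (out : Bool) : Decidable (Spec_has_duplicates_in_unit unit out) := by unfold Spec_has_duplicates_in_unit; infer_instance

-- ===== CLAIM (what is proved, stated in full; the proofs are below) =====
def Claim_equal_has_duplicates_in_unit : Prop := ∀ (unit : List Int), Dom_has_duplicates_in_unit unit → Spec_has_duplicates_in_unit unit (has_duplicates_in_unit unit)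

-- ===== LEMMAS AND PROOFS =====

-- A's loop answers "is seen ++ (non-zero filter of xs) duplicate-free?", negated.
theorem hasDupGoA_eq (xs : List Int) (seen : PySem.Set Int) (hs : seen.Nodup) :
    hasDupGoA xs seen = !decide (seen ++ xs.filter (fun v => v != 0)).Nodup := by
  induction xs generalizing seen with
  | nil => simp [hasDupGoA, hs]
  | cons v rest ih =>
    by_cases hv : (v != 0) = true
    · rw [List.filter_cons, if_pos hv]
      by_cases hmem : v ∈ seen
      · have hnd : ¬ (seen ++ v :: List.filter (fun v => v != 0) rest).Nodup := by
          intro h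
          exact (List.disjoint_of_nodup_append h) hmem (by simp)
        simp only [hnd, decide_false, Bool.not_false]
        simp [hasDupGoA, hv, hmem]
      · have hstep : hasDupGoA (v :: rest) seen = hasDupGoA rest (PySem.Set.add seen v) := by
          simp [hasDupGoA, hv, hmem]
        rw [hstep, PySem.Set.add_of_not_mem hmem,
          ih (seen ++ [v]) (by
            rw [List.nodup_append]
            refine ⟨hs, List.nodup_singleton v, ?_⟩
            intro a ha b hb
            rw [List.mem_singleton] at hb
            subst hb
            exact fun e => hmem (e ▸ ha)),
          List.append_assoc]
        simp
    · rw [List.filter_cons, if_neg hv]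
      have hstep : hasDupGoA (v :: rest) seen = hasDupGoA rest seen := by
        simp [hasDupGoA, hv]
      rw [hstep, ih seen hs]

-- On a weakly increasing list, an equal adjacent pair exists iff the list has a duplicate.
theorem adj_any_eq_not_nodup (l : List Int) (hl : l.Pairwise (· ≤ ·)) :
    (l.zip (l.drop 1)).any (fun p => p.1 == p.2) = !decide l.Nodup := by
  induction l with
  | nil => simp
  | cons a t ih =>
    cases t with
    | nil => simp
    | cons b t' =>
      rw [List.pairwise_cons] at hl
      obtain ⟨hab, htl⟩ := hl
      by_cases heq : a = b
      · subst heq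
        have : ¬ (a :: a :: t').Nodup := by simp
        simp [this]
      · have hstep : ((a :: b :: t').zip ((a :: b :: t').drop 1)).any (fun p => p.1 == p.2)
            = ((b :: t').zip ((b :: t').drop 1)).any (fun p => p.1 == p.2) := by
          simp [List.zip, heq]
        have hnotmem : a ∉ b :: t' := by
          intro hmem
          rcases List.mem_cons.mp hmem with h | h
          · exact heq h
          · have h1 : a ≤ b := hab b (by simp)
            have h2 : b ≤ a := (List.pairwise_cons.mp htl).1 a h
            exact heq (le_antisymm h1 h2)
        have hiff : (a :: b :: t').Nodup ↔ (b :: t').Nodup := by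
          rw [List.nodup_cons]
          exact ⟨fun h => h.2, fun h => ⟨hnotmem, h⟩⟩
        rw [hstep, ih htl]
        by_cases hn : (b :: t').Nodup
        · simp [hn, hiff.mpr hn]
        · simp [hn, hiff]

-- ===== VERDICT (by name: the statement is the Claim_ definition above) =====
theorem has_duplicates_in_unit_spec : Claim_equal_has_duplicates_in_unit := by
  intro unit _
  show has_duplicates_in_unit unit = has_duplicates_in_unit_alt unit
  unfold has_duplicates_in_unit has_duplicates_in_unit_alt
  rw [hasDupGoA_eq unit PySem.Set.empty List.nodup_nil,
    show (PySem.Set.empty : PySem.Set Int) ++ unit.filter (fun v => v != 0)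
        = unit.filter (fun v => v != 0) from List.nil_append _]
  set f := unit.filter (fun v => v != 0) with hf
  have hperm : (PySem.List.sorted f (fun x => x) false).Perm f :=
    PySem.List.sorted_perm f (fun x => x) false
  have hpw : (PySem.List.sorted f (fun x => x) false).Pairwise (· ≤ ·) :=
    PySem.List.sorted_pairwise (xs := f) (key := fun x => x)
  rw [adj_any_eq_not_nodup _ hpw]
  simp [hperm.nodup_iff]
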